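-- pv_equiv track=rewrite | github.com/bighitranpro/webapptool | modules/email_splitter.py | split_alphabetically
-- ===== SOURCE A (Python) =====
-- from typing import List, Dict
--
-- def split_alphabetically(emails: List[str],
--                        letters_per_group: int = 3) -> Dict[str, List[str]]:
--     """Split emails alphabetically"""
--     groups = {}
--     alphabet = 'abcdefghijklmnopqrstuvwxyz'
--
--     # Create letter groups
--     for i in range(0, len(alphabet), letters_per_group):
--         group_letters = alphabet[i:i + letters_per_group]
--         group_key = f"{group_letters[0].upper()}-{group_letters[-1].upper()}"
--         groups[group_key] = []
--
--     groups['Other'] = []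
--
--     # Distribute emails
--     for email in emails:
--         first_char = email[0].lower()
--         placed = False
--
--         for i in range(0, len(alphabet), letters_per_group):
--             group_letters = alphabet[i:i + letters_per_group]
--             if first_char in group_letters:
--                 group_key = f"{group_letters[0].upper()}-{group_letters[-1].upper()}"
--                 groups[group_key].append(email)
--                 placed = True
--                 break
--
--         if not placed:
--             groups['Other'].append(email)
--
--     # Remove empty groups
--     return {k: v for k, v in groups.items() if v}
-- ===== SOURCE B (Python) =====
-- def split_alphabetically(emails, letters_per_group=3):
--     """Split emails alphabetically (single pass; bucket found by arithmetic, not by scanning groups)"""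
--     alphabet = 'abcdefghijklmnopqrstuvwxyz'
--
--     def key_at(start):
--         g = alphabet[start:start + letters_per_group]
--         return f"{g[0].upper()}-{g[-1].upper()}"
--
--     keys = [key_at(i) for i in range(0, len(alphabet), letters_per_group)]
--     buckets = {k: [] for k in keys}
--     buckets['Other'] = []
--
--     for email in emails:
--         c = email[0].lower()
--         if letters_per_group > 0 and 'a' <= c <= 'z':
--             k = key_at((ord(c) - ord('a')) // letters_per_group * letters_per_group)
--         else:
--             k = 'Other'
--         buckets[k].append(email)
--
--     return {k: v for k, v in buckets.items() if v}
-- ===== Notes on version B (the rewrite author's own statement) =====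
-- stated objective: alternative
-- what changed: Replaces the per-email linear scan over all letter groups (membership test in each slice) with a single pass that computes the bucket's start index directly by integer arithmetic ((ord(c)-ord('a'))//letters_per_group*letters_per_group), prebuilding the buckets once in the same key order.
import Mathlib
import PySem

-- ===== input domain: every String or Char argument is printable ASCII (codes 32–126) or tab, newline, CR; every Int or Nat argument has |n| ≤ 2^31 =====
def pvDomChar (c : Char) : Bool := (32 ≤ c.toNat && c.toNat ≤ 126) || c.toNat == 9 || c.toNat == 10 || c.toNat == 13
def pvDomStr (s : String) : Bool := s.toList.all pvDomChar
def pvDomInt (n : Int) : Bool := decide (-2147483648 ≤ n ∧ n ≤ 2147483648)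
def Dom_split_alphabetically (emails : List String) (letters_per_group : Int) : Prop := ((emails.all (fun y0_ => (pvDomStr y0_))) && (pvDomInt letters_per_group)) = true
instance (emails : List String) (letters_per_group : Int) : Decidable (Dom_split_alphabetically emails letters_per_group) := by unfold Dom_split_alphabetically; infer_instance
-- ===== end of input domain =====

-- B replaces A's per-email linear scan over the letter groups by a direct arithmetic
-- computation of the bucket's start index (objective: alternative, same key order).

-- ===== PORT A =====
def pvAlphabet : List Char := "abcdefghijklmnopqrstuvwxyz".toList

-- f"{group_letters[0].upper()}-{group_letters[-1].upper()}" for group_letters = alphabet[i:i+lpg]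
-- (the [0]/[-1] default 'a' is unreachable: the slice is nonempty whenever this is called)
def pvKeyStr (i lpg : Int) : String :=
  let g := PySem.List.slice pvAlphabet (some i) (some (i + lpg))
  String.ofList (PySem.Chars.upper [PySem.List.pyGetD g 0 'a'] ++ ['-'] ++ PySem.Chars.upper [PySem.List.pyGetD g (-1) 'a'])

def pvLowerChar (c : Char) : Char := (PySem.Chars.lower [c]).headD c

-- A's inner 'for i in range(...): if first_char in group_letters: … break' with the 'placed' flag:
-- first i whose slice contains the char gives the key, otherwise 'Other'
def pvScanA (ch : Char) (lpg : Int) : List Int → String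
  | [] => "Other"
  | i :: rest =>
    if (PySem.List.slice pvAlphabet (some i) (some (i + lpg))).contains ch then pvKeyStr i lpg
    else pvScanA ch lpg rest

def split_alphabetically (emails : List String) (letters_per_group : Int) : List (String × List String) :=
  let groups : PySem.Dict String (List String) :=
    (PySem.List.pyRange 0 26 letters_per_group).foldl
      (fun d i => d.insert (pvKeyStr i letters_per_group) []) PySem.Dict.empty
  let groups := groups.insert "Other" []
  let groups := emails.foldl (fun d email =>
      let first_char := pvLowerChar (PySem.List.pyGetD email.toList 0 'a')  -- email[0]: default unreachable under Pre_
      d.modify (pvScanA first_char letters_per_group (PySem.List.pyRange 0 26 letters_per_group)) [] (· ++ [email])) groups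
  groups.items.filter (fun kv => !kv.2.isEmpty)

-- ===== PORT B =====
def pvKeyB (c : Char) (lpg : Int) : String :=
  if 0 < lpg ∧ 'a' ≤ c ∧ c ≤ 'z' then
    pvKeyStr ((PySem.Int.floordiv ((c.toNat : Int) - 97) lpg) * lpg) lpg
  else "Other"

def split_alphabetically_alt (emails : List String) (letters_per_group : Int) : List (String × List String) :=
  let keys := (PySem.List.pyRange 0 26 letters_per_group).map (fun i => pvKeyStr i letters_per_group)
  let buckets : PySem.Dict String (List String) :=
    keys.foldl (fun d k => d.insert k []) PySem.Dict.empty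
  let buckets := buckets.insert "Other" []
  let buckets := emails.foldl (fun d email =>
      let c := pvLowerChar (PySem.List.pyGetD email.toList 0 'a')
      d.modify (pvKeyB c letters_per_group) [] (· ++ [email])) buckets
  buckets.items.filter (fun kv => !kv.2.isEmpty)

-- ===== PRECONDITION & SPEC =====
-- Pre_ excludes exactly the inputs where A raises: letters_per_group = 0 (ValueError from range)
-- and an empty email string (IndexError from email[0]).
def Pre_split_alphabetically (emails : List String) (letters_per_group : Int) : Prop :=
  letters_per_group ≠ 0 ∧ ∀ e ∈ emails, e.toList ≠ []
instance (emails : List String) (letters_per_group : Int) : Decidable (Pre_split_alphabetically emails letters_per_group) := by unfold Pre_split_alphabetically; infer_instance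

def pvWitness_split_alphabetically : List String × Int := (["alice", "Bob", "zed", "9x"], 3)

def Spec_split_alphabetically (emails : List String) (letters_per_group : Int) (out : List (String × List String)) : Prop := out = split_alphabetically_alt emails letters_per_group
instance (emails : List String) (letters_per_group : Int) (out : List (String × List String)) : Decidable (Spec_split_alphabetically emails letters_per_group out) := by unfold Spec_split_alphabetically; infer_instance

-- ===== CLAIM (what is proved, stated in full; the proofs are below) =====
def Claim_equal_split_alphabetically : Prop := ∀ (emails : List String) (letters_per_group : Int), Dom_split_alphabetically emails letters_per_group → Pre_split_alphabetically emails letters_per_group → Spec_split_alphabetically emails letters_per_group (split_alphabetically emails letters_per_group)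

-- ===== LEMMAS AND PROOFS =====

theorem pvAlphabet_length : pvAlphabet.length = 26 := by decide

set_option maxRecDepth 4000 in
theorem pvAlphabet_getElem : ∀ j, (h : j < 26) → pvAlphabet[j]'(by rw [pvAlphabet_length]; exact h) = Char.ofNat (97 + j) := by decide

theorem pvAlphabet_mem_bounds : ∀ c ∈ pvAlphabet, 'a' ≤ c ∧ c ≤ 'z' := by
  have h : pvAlphabet.all (fun c => decide ('a' ≤ c) && decide (c ≤ 'z')) = true := by decide
  intro c hc
  simpa using List.all_eq_true.mp h c hc

-- c ∈ alphabet[i:i+lpg]  ↔  i ≤ ord(c)-97 < i+lpg   (for a lowercase letter c, 0 ≤ i, 0 < lpg)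
theorem pv_mem_slice_iff (ch : Char) (hc : 'a' ≤ ch ∧ ch ≤ 'z') (i lpg : Int) (hi : 0 ≤ i) (hl : 0 < lpg) :
    ((PySem.List.slice pvAlphabet (some i) (some (i + lpg))).contains ch = true) ↔
      (i ≤ (ch.toNat : Int) - 97 ∧ (ch.toNat : Int) - 97 < i + lpg) := by
  have hn1 : 97 ≤ ch.toNat := hc.1
  have hn2 : ch.toNat ≤ 122 := hc.2
  rw [PySem.List.slice_toNat pvAlphabet hi (by omega)]
  rw [List.contains_iff_mem, List.mem_iff_getElem]
  constructor
  · rintro ⟨j, hj, hje⟩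
    rw [List.length_take, List.length_drop, pvAlphabet_length] at hj
    have h26 : i.toNat + j < 26 := by omega
    have : (List.take ((i + lpg).toNat - i.toNat) (List.drop i.toNat pvAlphabet))[j]'(by
        rw [List.length_take, List.length_drop, pvAlphabet_length]; omega) =
        pvAlphabet[i.toNat + j]'(by rw [pvAlphabet_length]; exact h26) := by
      rw [List.getElem_take, List.getElem_drop]
    rw [this, pvAlphabet_getElem _ h26] at hje
    have := congrArg Char.toNat hje
    rw [show (Char.ofNat (97 + (i.toNat + j))).toNat = 97 + (i.toNat + j) from by
      interval_cases h : (i.toNat + j) <;> decide] at this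
    omega
  · rintro ⟨h1, h2⟩
    refine ⟨ch.toNat - 97 - i.toNat, ?_, ?_⟩
    · rw [List.length_take, List.length_drop, pvAlphabet_length]
      omega
    · rw [List.getElem_take, List.getElem_drop, pvAlphabet_getElem _ (by omega)]
      rw [show 97 + (i.toNat + (ch.toNat - 97 - i.toNat)) = ch.toNat from by omega]
      exact Char.ofNat_toNat ch

theorem pvScanA_all_false (ch : Char) (lpg : Int) (l : List Int)
    (h : ∀ i ∈ l, ¬ ((PySem.List.slice pvAlphabet (some i) (some (i + lpg))).contains ch = true)) :
    pvScanA ch lpg l = "Other" := by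
  induction l with
  | nil => rfl
  | cons i rest ih =>
    rw [pvScanA, if_neg (h i (by simp))]
    exact ih (fun j hj => h j (by simp [hj]))

theorem pvScanA_append (ch : Char) (lpg : Int) (pre : List Int) (t : Int) (rest : List Int)
    (hpre : ∀ i ∈ pre, ¬ ((PySem.List.slice pvAlphabet (some i) (some (i + lpg))).contains ch = true))
    (ht : (PySem.List.slice pvAlphabet (some t) (some (t + lpg))).contains ch = true) :
    pvScanA ch lpg (pre ++ t :: rest) = pvKeyStr t lpg := by
  induction pre with
  | nil => rw [List.nil_append, pvScanA, if_pos ht]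
  | cons i pre' ih =>
    rw [List.cons_append, pvScanA, if_neg (hpre i (by simp))]
    exact ih (fun j hj => hpre j (by simp [hj]))

-- the key pointwise lemma: A's scan and B's arithmetic pick the same key for every char
theorem pv_key_eq (lpg : Int) (hl : lpg ≠ 0) (ch : Char) :
    pvScanA ch lpg (PySem.List.pyRange 0 26 lpg) = pvKeyB ch lpg := by
  rcases lt_or_gt_of_ne hl with hneg | hpos
  · have : PySem.List.pyRange 0 26 lpg = [] := by
      simp [PySem.List.pyRange, hl, show ¬ (0 < lpg) by omega]
    rw [this, pvScanA, pvKeyB, if_neg (by omega)]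
  · by_cases hc : 'a' ≤ ch ∧ ch ≤ 'z'
    · -- lowercase letter: the scan stops at the multiple of lpg that B computes directly
      have hn1 : 97 ≤ ch.toNat := hc.1
      have hn2 : ch.toNat ≤ 122 := hc.2
      set m : Int := (ch.toNat : Int) - 97 with hm
      set q : Int := m / lpg with hq
      have hq0 : 0 ≤ q := Int.ediv_nonneg (by omega) (by omega)
      have hql : q * lpg ≤ m := by
        have := Int.ediv_mul_le m (show lpg ≠ 0 by omega)
        omega
      have hqu : m < (q + 1) * lpg := by
        have := Int.lt_ediv_add_one_mul_self m hpos
        omega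
      rw [PySem.List.pyRange_of_pos 0 26 hpos, if_pos (show (0:Int) < 26 by norm_num)]
      set Kn := ((26 - 0 + lpg - 1) / lpg).toNat with hKn
      have hqK : q.toNat + 1 ≤ Kn := by
        have h1 : q + 1 ≤ (26 - 0 + lpg - 1) / lpg := by
          rw [Int.le_ediv_iff_mul_le hpos]
          nlinarith [hql, hq0, hn2]
        omega
      obtain ⟨t, htt⟩ : ∃ t, Kn = q.toNat + (t + 1) := ⟨Kn - q.toNat - 1, by omega⟩
      rw [htt, List.range_eq_range']
      rw [show List.range' 0 (q.toNat + (t + 1)) = List.range' 0 q.toNat ++ List.range' (0 + 1 * q.toNat) (t + 1) from List.range'_append.symm]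
      rw [List.range'_succ, List.map_append, List.map_cons]
      simp only [Nat.zero_add, Nat.one_mul]
      rw [show (0:Int) + lpg * ((q.toNat : Nat) : Int) = q * lpg from by
        rw [Int.toNat_of_nonneg hq0]; ring]
      rw [pvScanA_append]
      · rw [pvKeyB, if_pos ⟨hpos, hc⟩]
        congr 1
        rw [PySem.Int.floordiv_eq_ediv_of_pos hpos]
      · intro i hi
        simp only [List.mem_map, List.mem_range'] at hi
        obtain ⟨k, ⟨k', hk', hkk⟩, rfl⟩ := hi
        rw [pv_mem_slice_iff ch hc _ lpg (by positivity) hpos]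
        rintro ⟨hm1, hm2⟩
        have hkq : (k : Int) + 1 ≤ q := by omega
        have : lpg * ((k : Int) + 1) ≤ lpg * q := by
          exact mul_le_mul_of_nonneg_left hkq (by omega)
        nlinarith [hql]
      · rw [pv_mem_slice_iff ch hc _ lpg (by positivity) hpos]
        constructor
        · nlinarith [hql]
        · nlinarith [hqu]
    · -- not a lowercase letter: every slice misses it, both sides give 'Other'
      rw [pvKeyB, if_neg (by tauto)]
      apply pvScanA_all_false
      intro i hi hmem
      rw [List.contains_iff_mem] at hmem
      exact hc (pvAlphabet_mem_bounds ch (PySem.List.mem_of_mem_slice _ _ _ hmem))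

-- ===== VERDICT (by name: the statement is the Claim_ definition above) =====
theorem split_alphabetically_spec : Claim_equal_split_alphabetically := by
  intro emails lpg _ hpre
  unfold Spec_split_alphabetically
  have hfun : (fun (d : PySem.Dict String (List String)) (email : String) =>
      d.modify (pvScanA (pvLowerChar (PySem.List.pyGetD email.toList 0 'a')) lpg
        (PySem.List.pyRange 0 26 lpg)) [] (fun x => x ++ [email])) =
      (fun (d : PySem.Dict String (List String)) (email : String) =>
      d.modify (pvKeyB (pvLowerChar (PySem.List.pyGetD email.toList 0 'a')) lpg) [] (fun x => x ++ [email])) := by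
    funext d email
    rw [pv_key_eq lpg hpre.1]
  simp only [split_alphabetically, split_alphabetically_alt, List.foldl_map, hfun]
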